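-- pv_equiv track=rewrite | github.com/SilvaDragon/CurTelBot | metal_parser.py | closing_holes
-- ===== SOURCE A (Python) =====
-- def closing_holes(array, numeration, duration):
--     new_arr = []
--     new_num = list(range(duration))
--     flag = False                 # indicator that there was an already valid element
--     for i in range(duration):
--         try:
--             arr_elm = array[numeration.index(i)]
--             new_arr.append(arr_elm)
--             if not flag:
--                 for j in range(i):
--                     new_arr[j] = new_arr[i]
--                 flag = True
--         except ValueError:
--             if flag:
--                 new_arr.append(new_arr[i-1])
--             else:
--                 new_arr.append(0)
--     new_arr = new_arr[0:duration]
--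
--     return new_arr, new_num
-- ===== SOURCE B (Python) =====
-- def closing_holes(array, numeration, duration):
--     # run-length construction: collect occupied positions once, sort them,
--     # and emit each gap as one replicated segment (no per-position scan or backfill)
--     new_num = list(range(duration))
--     occ = {}
--     for p, x in zip(numeration, array):
--         if 0 <= p < duration and p not in occ:
--             occ[p] = x
--     if not occ:
--         return [0] * duration, new_num
--     pts = sorted(occ)
--     new_arr = [occ[pts[0]]] * pts[0]
--     for p, q in zip(pts, pts[1:]):
--         new_arr += [occ[p]] * (q - p)
--     new_arr += [occ[pts[-1]]] * (duration - pts[-1])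
--     return new_arr, new_num
-- ===== Notes on version B (the rewrite author's own statement) =====
-- stated objective: faster
-- what changed: B is a run-length/segment construction: it collects the occupied positions (first occurrence, in range) in one pass over zip(numeration, array), sorts them, and emits the answer as concatenated replicated segments between consecutive occupied positions — there is no per-position loop over range(duration), no numeration.index scan, no flag and no backfill pass.
import Mathlib
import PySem

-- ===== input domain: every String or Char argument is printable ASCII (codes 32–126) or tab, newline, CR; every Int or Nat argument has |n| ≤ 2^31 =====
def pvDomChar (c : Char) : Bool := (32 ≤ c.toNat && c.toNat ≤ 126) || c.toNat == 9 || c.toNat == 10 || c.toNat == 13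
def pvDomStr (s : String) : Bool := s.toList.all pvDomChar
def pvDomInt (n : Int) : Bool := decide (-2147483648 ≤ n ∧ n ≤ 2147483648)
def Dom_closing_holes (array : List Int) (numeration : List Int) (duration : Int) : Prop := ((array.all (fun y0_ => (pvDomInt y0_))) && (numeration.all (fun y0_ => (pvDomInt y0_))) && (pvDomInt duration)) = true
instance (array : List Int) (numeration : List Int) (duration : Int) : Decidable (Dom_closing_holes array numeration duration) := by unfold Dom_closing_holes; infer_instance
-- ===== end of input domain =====

-- B builds the answer by run-length segments between sorted occupied positions (no per-position
-- scan, flag or backfill pass); measurably faster.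

-- ===== PORT A =====
-- one loop-body step of A's 'for i in range(duration)'; the '.getD 0' fallbacks are never
-- taken on inputs admitted by Pre_ (which excludes the IndexError inputs)
def pvStepA (array : List Int) (numeration : List Int) (st : List Int × Bool) (i : Int) : List Int × Bool :=
  match PySem.List.index? numeration i with
  | some idx =>
      let arr_elm := (PySem.List.pyGet? array (idx : Int)).getD 0
      let na := st.1 ++ [arr_elm]
      if st.2 = false then
        ((PySem.List.pyRange 0 i 1).foldl (fun a j => a.set j.toNat ((PySem.List.pyGet? a i).getD 0)) na, true)
      else (na, st.2)
  | none =>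
      if st.2 then (st.1 ++ [(PySem.List.pyGet? st.1 (i - 1)).getD 0], st.2)
      else (st.1 ++ [(0 : Int)], st.2)

def closing_holes (array : List Int) (numeration : List Int) (duration : Int) : List Int × List Int :=
  let new_num := PySem.List.pyRange 0 duration 1
  let st := (PySem.List.pyRange 0 duration 1).foldl (pvStepA array numeration) ([], false)
  (PySem.List.slice st.1 (some 0) (some duration), new_num)

-- ===== PORT B =====
-- occ: first-occurrence value for each in-range position, one pass over zip(numeration, array)
def pvOcc (array : List Int) (numeration : List Int) (duration : Int) : PySem.Dict Int Int :=
  (numeration.zip array).foldl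
    (fun d p => if 0 ≤ p.1 ∧ p.1 < duration ∧ d.contains p.1 = false then d.insert p.1 p.2 else d)
    PySem.Dict.empty

-- the occupied branch: leading segment, one segment per consecutive pair of points, tail segment
def pvSegBuild (occ : PySem.Dict Int Int) (duration : Int) (p0 : Int) (rest : List Int) : List Int :=
  let lead := List.replicate p0.toNat (occ.getD p0 0)
  let lst := (p0 :: rest).getLast (List.cons_ne_nil p0 rest)
  ((p0 :: rest).zip rest).foldl
      (fun a pq => a ++ List.replicate (pq.2 - pq.1).toNat (occ.getD pq.1 0)) lead
    ++ List.replicate (duration - lst).toNat (occ.getD lst 0)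

def closing_holes_alt (array : List Int) (numeration : List Int) (duration : Int) : List Int × List Int :=
  match PySem.List.sorted (pvOcc array numeration duration).keys (fun x => x) false with
  | [] => (List.replicate duration.toNat 0, PySem.List.pyRange 0 duration 1)
  | p0 :: rest =>
      (pvSegBuild (pvOcc array numeration duration) duration p0 rest, PySem.List.pyRange 0 duration 1)

-- ===== PRECONDITION & SPEC =====
-- Pre_ excludes exactly the inputs where A raises IndexError: some i in range(duration)
-- occurs in numeration but its first occurrence index is >= len(array).
def Pre_closing_holes (array : List Int) (numeration : List Int) (duration : Int) : Prop :=
  (numeration.drop array.length).all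
    (fun v => decide (v < 0 ∨ duration ≤ v) || decide (v ∈ numeration.take array.length)) = true
instance (array : List Int) (numeration : List Int) (duration : Int) : Decidable (Pre_closing_holes array numeration duration) := by unfold Pre_closing_holes; infer_instance

def pvWitness_closing_holes : List Int × List Int × Int := ([5], [0], 3)

def Spec_closing_holes (array : List Int) (numeration : List Int) (duration : Int) (out : List Int × List Int) : Prop := out = closing_holes_alt array numeration duration
instance (array : List Int) (numeration : List Int) (duration : Int) (out : List Int × List Int) : Decidable (Spec_closing_holes array numeration duration out) := by unfold Spec_closing_holes; infer_instance

-- ===== CLAIM (what is proved, stated in full; the proofs are below) =====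
def Claim_equal_closing_holes : Prop := ∀ (array : List Int) (numeration : List Int) (duration : Int), Dom_closing_holes array numeration duration → Pre_closing_holes array numeration duration → Spec_closing_holes array numeration duration (closing_holes array numeration duration)

-- ===== LEMMAS AND PROOFS =====

-- Pre_ says exactly that every first-occurrence index queried by A is inside array
theorem pvPreIdx (array numeration : List Int) (duration : Int)
    (hpre : Pre_closing_holes array numeration duration) :
    ∀ i : Int, 0 ≤ i → i < duration →
      ∀ idx, PySem.List.index? numeration i = some idx → idx < array.length := by
  intro i h1 h2 idx hidx
  by_contra hge
  rw [not_lt] at hge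
  obtain ⟨pre, suf, hsplit, hlen, hnotmem⟩ := (PySem.List.index?_eq_some_iff _ _ _).mp hidx
  have hle : array.length ≤ pre.length := by omega
  have hmem : i ∈ numeration.drop array.length := by
    rw [hsplit, List.drop_append_of_le_length hle]
    exact List.mem_append_right _ (List.mem_cons_self)
  unfold Pre_closing_holes at hpre
  rw [List.all_eq_true] at hpre
  have := hpre i hmem
  have hmemtake : i ∈ numeration.take array.length := by
    rcases Bool.or_eq_true_iff.mp this with h | h
    · exact absurd (of_decide_eq_true h) (by omega)
    · exact of_decide_eq_true h
  have : i ∈ pre := by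
    rw [hsplit, List.take_append_of_le_length hle] at hmemtake
    exact List.mem_of_mem_take hmemtake
  exact hnotmem this

-- first match in the zip = value of array at the first occurrence index in numeration
theorem pvZipFind (numeration : List Int) : ∀ (array : List Int) (v : Int),
    (∀ idx, PySem.List.index? numeration v = some idx → idx < array.length) →
    ((numeration.zip array).find? (fun p => p.1 == v)).map (·.2)
      = (PySem.List.index? numeration v).map (fun idx => array.getD idx 0) := by
  induction numeration with
  | nil => intro a v _; simp [PySem.List.index?]
  | cons c n' ih =>
    intro a v h
    cases a with
    | nil =>
      cases hx : PySem.List.index? (c :: n') v with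
      | none => simp
      | some idx => exact absurd (h idx hx) (by simp)
    | cons y a' =>
      by_cases hv : c = v
      · subst hv
        rw [PySem.List.index?_cons_self]
        simp
      · rw [PySem.List.index?_cons_of_ne (h := hv)]
        have h' : ∀ idx, PySem.List.index? n' v = some idx → idx < a'.length := by
          intro idx hx
          have := h (idx + 1) (by rw [PySem.List.index?_cons_of_ne (h := hv), hx]; rfl)
          simpa using this
        have := ih a' v h'
        simp only [List.zip_cons_cons, List.find?_cons, show (((c, y).1 == v)) = false from by simp [hv]]
        rw [this]
        cases PySem.List.index? n' v <;> simp

-- the filtered first-occurrence fold: lookup of an in-range key = first zip pair with that key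
theorem pvOccFoldGet (duration : Int) :
    ∀ (l : List (Int × Int)) (d : PySem.Dict Int Int) (v : Int), 0 ≤ v → v < duration →
    (l.foldl (fun d p => if 0 ≤ p.1 ∧ p.1 < duration ∧ d.contains p.1 = false then d.insert p.1 p.2 else d) d).get? v
    = ((d.get? v).or ((l.find? (fun p => p.1 == v)).map (·.2))) := by
  intro l
  induction l with
  | nil => intro d v _ _; simp
  | cons p rest ih =>
    intro d v h1 h2
    simp only [List.foldl_cons, List.find?_cons]
    by_cases hv : p.1 = v
    · by_cases hc : d.contains p.1 = false
      · rw [if_pos ⟨by omega, by omega, hc⟩]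
        rw [ih _ v h1 h2]
        have hins : (d.insert p.1 p.2).get? v = some p.2 := by
          rw [← hv]; exact PySem.Dict.get?_insert_self d p.1 p.2
        have hdnone : d.get? v = none := by
          rw [← hv]
          have := hc
          rw [PySem.Dict.contains_eq_isSome_get?] at this
          simpa using this
        simp [hins, hdnone, show (p.1 == v) = true from by simp [hv]]
      · rw [if_neg (by tauto)]
        rw [ih _ v h1 h2]
        have hs : (d.get? v).isSome := by
          have hc' : d.contains v = true := by
            rw [← hv]; simpa using hc
          rw [PySem.Dict.contains_eq_isSome_get?] at hc'
          exact hc'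
        obtain ⟨w, hw⟩ := Option.isSome_iff_exists.mp hs
        simp [hw, show (p.1 == v) = true from by simp [hv]]
    · have hfind : (p.1 == v) = false := by simp [hv]
      by_cases hcond : 0 ≤ p.1 ∧ p.1 < duration ∧ d.contains p.1 = false
      · rw [if_pos hcond, ih _ v h1 h2]
        rw [PySem.Dict.get?_insert_of_ne (hne := fun h => hv h.symm)]
        simp [hfind]
      · rw [if_neg hcond, ih _ v h1 h2]
        simp [hfind]

theorem pvOccGet (array numeration : List Int) (duration v : Int) (h1 : 0 ≤ v) (h2 : v < duration)
    (h : ∀ idx, PySem.List.index? numeration v = some idx → idx < array.length) :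
    (pvOcc array numeration duration).get? v
    = (PySem.List.index? numeration v).map (fun idx => array.getD idx 0) := by
  unfold pvOcc
  rw [pvOccFoldGet duration _ _ v h1 h2]
  rw [show (PySem.Dict.empty : PySem.Dict Int Int).get? v = none from PySem.Dict.get?_empty _]
  rw [Option.none_or]
  exact pvZipFind numeration array v h

-- keys of the occ fold stay Nodup
theorem pvOccKeysNodup (array numeration : List Int) (duration : Int) :
    (pvOcc array numeration duration).keys.Nodup := by
  unfold pvOcc
  have : ∀ (l : List (Int × Int)) (d : PySem.Dict Int Int), d.keys.Nodup →
      (l.foldl (fun d p => if 0 ≤ p.1 ∧ p.1 < duration ∧ d.contains p.1 = false then d.insert p.1 p.2 else d) d).keys.Nodup := by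
    intro l
    induction l with
    | nil => intro d h; simpa using h
    | cons p rest ih =>
      intro d h
      simp only [List.foldl_cons]
      by_cases hcond : 0 ≤ p.1 ∧ p.1 < duration ∧ d.contains p.1 = false
      · rw [if_pos hcond]
        apply ih
        rw [PySem.Dict.keys_insert_of_not_contains (h := hcond.2.2)]
        have hnm : p.1 ∉ d.keys := by
          rw [← PySem.Dict.contains_iff_mem_keys]
          simp [hcond.2.2]
        rw [List.nodup_append]
        refine ⟨h, by simp, ?_⟩
        intro a ha b hb
        simp only [List.mem_singleton] at hb
        subst hb
        exact fun he => hnm (he ▸ ha)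
      · rw [if_neg hcond]; exact ih d h
  exact this _ _ (by simp)

-- every key of occ lies in [0, duration)
theorem pvOccKeysRange (array numeration : List Int) (duration : Int) :
    ∀ k ∈ (pvOcc array numeration duration).keys, 0 ≤ k ∧ k < duration := by
  unfold pvOcc
  have : ∀ (l : List (Int × Int)) (d : PySem.Dict Int Int), (∀ k ∈ d.keys, 0 ≤ k ∧ k < duration) →
      ∀ k ∈ (l.foldl (fun d p => if 0 ≤ p.1 ∧ p.1 < duration ∧ d.contains p.1 = false then d.insert p.1 p.2 else d) d).keys, 0 ≤ k ∧ k < duration := by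
    intro l
    induction l with
    | nil => intro d h; simpa using h
    | cons p rest ih =>
      intro d h
      simp only [List.foldl_cons]
      by_cases hcond : 0 ≤ p.1 ∧ p.1 < duration ∧ d.contains p.1 = false
      · rw [if_pos hcond]
        apply ih
        intro k hk
        rcases (PySem.Dict.mem_keys_insert _ _ _ _).mp hk with hk | hk
        · subst hk; exact ⟨hcond.1, hcond.2.1⟩
        · exact h k hk
      · rw [if_neg hcond]; exact ih d h
  intro k hk
  exact this _ _ (by simp) k hk

-- A's loop before any valid element: appends zeros, flag stays false
theorem pvAfoldNone (array numeration : List Int) :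
    ∀ (l : List Int) (acc : List Int), (∀ i ∈ l, PySem.List.index? numeration i = none) →
    l.foldl (pvStepA array numeration) (acc, false) = (acc ++ List.replicate l.length 0, false) := by
  intro l
  induction l with
  | nil => intro acc _; simp
  | cons x rest ih =>
    intro acc h
    have hx : PySem.List.index? numeration x = none := h x (by simp)
    have hx' : List.idxOf? x numeration = none := by simpa using hx
    simp only [List.foldl_cons]
    rw [show pvStepA array numeration (acc, false) x = (acc ++ [(0:Int)], false) from by
      simp [pvStepA, hx']]
    rw [ih (acc ++ [(0:Int)]) (fun i hi => h i (by simp [hi]))]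
    simp [List.replicate_succ]

-- A's loop over a run of holes with the flag set: carries the last value forward
theorem pvAfoldCarry (array numeration : List Int) :
    ∀ (m : Nat) (a : Int) (l : List Int) (v : Int), l ≠ [] → l.getLast? = some v →
    (l.length : Int) = a →
    (∀ i, a ≤ i → i < a + m → PySem.List.index? numeration i = none) →
    (PySem.List.pyRange a (a + m) 1).foldl (pvStepA array numeration) (l, true)
      = (l ++ List.replicate m v, true) := by
  intro m
  induction m with
  | zero =>
    intro a l v _ _ _ _
    rw [show a + ((0:Nat):Int) = a from by push_cast; ring]
    rw [PySem.List.pyRange_one_eq_nil (le_refl a)]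
    simp
  | succ m ih =>
    intro a l v hne hlast hlen h
    have hcons : PySem.List.pyRange a (a + ((m:Nat)+1:Nat)) 1 = a :: PySem.List.pyRange (a+1) (a + ((m:Nat)+1:Nat)) 1 :=
      PySem.List.pyRange_one_cons (by push_cast; omega)
    have hx : PySem.List.index? numeration a = none := h a (le_refl a) (by push_cast; omega)
    have hx' : List.idxOf? a numeration = none := by simpa using hx
    have hget : (PySem.List.pyGet? l (a - 1)).getD 0 = v := by
      have h0 : (0:Int) ≤ a - 1 := by
        have : l.length ≠ 0 := fun hh => hne (List.eq_nil_of_length_eq_zero hh)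
        omega
      rw [PySem.List.pyGet?_of_nonneg (h := h0)]
      have : (a - 1).toNat = l.length - 1 := by omega
      rw [this, ← List.getLast?_eq_getElem?, hlast]
      rfl
    rw [hcons]
    simp only [List.foldl_cons]
    rw [show pvStepA array numeration (l, true) a = (l ++ [v], true) from by
      simp [pvStepA, hx', hget]]
    rw [show a + ((m:Nat)+1:Nat) = (a+1) + (m:Nat) from by push_cast; ring]
    rw [ih (a+1) (l ++ [v]) v (by simp) (by simp) (by simp; omega)
      (fun i hi1 hi2 => h i (by omega) (by push_cast at hi2 ⊢; omega))]
    simp [List.replicate_succ]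

-- A's backfill loop 'for j in range(i): new_arr[j] = new_arr[i]'
theorem pvBackfill (f' : Nat) (v : Int) : ∀ (k : Nat), k ≤ f' →
    (PySem.List.pyRange 0 (k : Int) 1).foldl
        (fun a j => a.set j.toNat ((PySem.List.pyGet? a ((f' : Nat) : Int)).getD 0))
        (List.replicate f' 0 ++ [v])
    = List.replicate k v ++ List.replicate (f' - k) 0 ++ [v] := by
  intro k
  induction k with
  | zero => intro _; simp [PySem.List.pyRange_one_eq_nil]
  | succ k ih =>
    intro hk
    have hk' : k ≤ f' := Nat.le_of_succ_le hk
    rw [show ((k + 1 : Nat) : Int) = (k : Int) + 1 from by push_cast; ring]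
    rw [PySem.List.pyRange_one_succ_right (by positivity)]
    rw [List.foldl_append, ih hk']
    simp only [List.foldl_cons, List.foldl_nil]
    have hget : (PySem.List.pyGet? (List.replicate k v ++ List.replicate (f' - k) 0 ++ [v]) ((f' : Nat) : Int)).getD 0 = v := by
      have hlen : (List.replicate k v ++ List.replicate (f' - k) 0).length = f' := by
        simp; omega
      have h2 := PySem.List.pyGet?_append_length (pre := List.replicate k v ++ List.replicate (f' - k) 0) (y := v) (ys := ([] : List Int))
      rw [hlen] at h2
      rw [show List.replicate k v ++ List.replicate (f' - k) 0 ++ [v] = (List.replicate k v ++ List.replicate (f' - k) 0) ++ v :: ([] : List Int) from by simp]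
      rw [h2]
      rfl
    rw [hget]
    have hfk : f' - k = (f' - k - 1) + 1 := by omega
    rw [hfk, List.replicate_succ]
    rw [show (k:Int).toNat = k from by simp]
    rw [List.append_assoc, List.append_assoc]
    rw [List.set_append_right _ _ (by simp)]
    simp only [List.length_replicate, Nat.sub_self]
    rw [List.replicate_succ']
    simp [List.append_assoc]
    omega

-- the suffix of the filled array after position p (holding value v), for occupied points qs > p
def pvRemFill (occ : PySem.Dict Int Int) (duration : Int) : Int → Int → List Int → List Int
  | p, v, [] => List.replicate (duration - (p+1)).toNat v
  | p, v, q :: rest =>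
      List.replicate (q - (p+1)).toNat v ++ (occ.getD q 0) :: pvRemFill occ duration q (occ.getD q 0) rest

-- the filled array from position p on (inclusive), as B's segments
def pvSegFrom (occ : PySem.Dict Int Int) (duration : Int) : Int → List Int → List Int
  | p, [] => List.replicate (duration - p).toNat (occ.getD p 0)
  | p, q :: rest => List.replicate (q - p).toNat (occ.getD p 0) ++ pvSegFrom occ duration q rest

theorem pvRemFillLen (occ : PySem.Dict Int Int) (duration : Int) :
    ∀ (qs : List Int) (p v : Int), p < duration → (∀ q ∈ qs, p < q ∧ q < duration) →
    qs.Pairwise (· < ·) →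
    ((pvRemFill occ duration p v qs).length : Int) = duration - (p+1) := by
  intro qs
  induction qs with
  | nil => intro p v hp _ _; simp [pvRemFill]; omega
  | cons q rest ih =>
    intro p v hp hmem hpw
    have hq := hmem q (by simp)
    have := ih q (occ.getD q 0) hq.2
      (fun r hr => ⟨(List.pairwise_cons.mp hpw).1 r hr, (hmem r (by simp [hr])).2⟩)
      (List.pairwise_cons.mp hpw).2
    simp only [pvRemFill, List.length_append, List.length_cons, List.length_replicate]
    push_cast
    omega

-- A's remaining loop (flag already set at position p with value v) produces exactly pvRemFill
theorem pvArest (array numeration : List Int) (duration : Int) (occ : PySem.Dict Int Int) :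
    ∀ (qs : List Int) (p v : Int) (l : List Int),
    l ≠ [] → l.getLast? = some v → (l.length : Int) = p + 1 → p < duration →
    qs.Pairwise (· < ·) →
    (∀ q ∈ qs, p < q ∧ q < duration) →
    (∀ q ∈ qs, (PySem.List.index? numeration q).map (fun idx => array.getD idx 0) = some (occ.getD q 0)) →
    (∀ i, p < i → i < duration → i ∉ qs → PySem.List.index? numeration i = none) →
    (PySem.List.pyRange (p+1) duration 1).foldl (pvStepA array numeration) (l, true)
      = (l ++ pvRemFill occ duration p v qs, true) := by
  intro qs
  induction qs with
  | nil =>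
    intro p v l hne hlast hlen hp _ _ _ hnone
    have hm : p + 1 + ((duration - (p+1)).toNat : Int) = duration := by omega
    rw [← hm]
    rw [pvAfoldCarry array numeration _ _ l v hne hlast hlen
      (fun i h1 h2 => hnone i (by omega) (by omega) (by simp))]
    simp [pvRemFill]
    omega
  | cons q rest ih =>
    intro p v l hne hlast hlen hp hpw hmem hval hnone
    have hq := hmem q (by simp)
    -- carry over the hole run (p, q)
    have hsplit : PySem.List.pyRange (p+1) duration 1
        = PySem.List.pyRange (p+1) q 1 ++ PySem.List.pyRange q duration 1 :=
      PySem.List.pyRange_one_append _ _ _ (by omega) (by omega)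
    have hm : (p + 1) + ((q - (p+1)).toNat : Int) = q := by omega
    have hcarry := pvAfoldCarry array numeration (q - (p+1)).toNat (p+1) l v hne hlast hlen
      (fun i h1 h2 => hnone i (by omega) (by omega)
        (by
          intro hmm
          rcases List.mem_cons.mp hmm with h' | h'
          · omega
          · have := (List.pairwise_cons.mp hpw).1 i h'; omega))
    rw [hm] at hcarry
    rw [hsplit, List.foldl_append, hcarry]
    -- the step at q itself
    have hvq := hval q (by simp)
    obtain ⟨idx, hidx, hvv⟩ : ∃ idx, PySem.List.index? numeration q = some idx ∧ array.getD idx 0 = occ.getD q 0 := by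
      cases hx : PySem.List.index? numeration q with
      | none => rw [hx] at hvq; simp at hvq
      | some idx => rw [hx] at hvq; exact ⟨idx, rfl, by simpa using hvq⟩
    have hidx' : List.idxOf? q numeration = some idx := by simpa using hidx
    have hcons : PySem.List.pyRange q duration 1 = q :: PySem.List.pyRange (q+1) duration 1 :=
      PySem.List.pyRange_one_cons (by omega)
    rw [hcons]
    simp only [List.foldl_cons]
    rw [show pvStepA array numeration (l ++ List.replicate (q - (p+1)).toNat v, true) q
        = ((l ++ List.replicate (q - (p+1)).toNat v) ++ [occ.getD q 0], true) from by
      simp [pvStepA, hidx', ← hvv, List.getD_eq_getElem?_getD]]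
    rw [ih q (occ.getD q 0) _ (by simp) (by simp) (by simp; omega) hq.2
      (List.pairwise_cons.mp hpw).2
      (fun r hr => ⟨(List.pairwise_cons.mp hpw).1 r hr, (hmem r (by simp [hr])).2⟩)
      (fun r hr => hval r (by simp [hr]))
      (fun i h1 h2 hni => hnone i (by omega) h2
        (by
          intro hmm
          rcases List.mem_cons.mp hmm with h' | h'
          · omega
          · exact hni h'))]
    simp [pvRemFill, List.append_assoc]

-- B's zip-fold plus tail segment = pvSegFrom
theorem pvSegFold (occ : PySem.Dict Int Int) (duration : Int) :
    ∀ (qs : List Int) (p : Int) (acc : List Int),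
    ((p :: qs).zip qs).foldl
        (fun a pq => a ++ List.replicate (pq.2 - pq.1).toNat (occ.getD pq.1 0)) acc
      ++ List.replicate (duration - (p :: qs).getLast (List.cons_ne_nil p qs)).toNat
          (occ.getD ((p :: qs).getLast (List.cons_ne_nil p qs)) 0)
    = acc ++ pvSegFrom occ duration p qs := by
  intro qs
  induction qs with
  | nil => intro p acc; simp [pvSegFrom]
  | cons q rest ih =>
    intro p acc
    simp only [List.zip_cons_cons, List.foldl_cons]
    rw [show (p :: q :: rest).getLast (List.cons_ne_nil p (q :: rest))
        = (q :: rest).getLast (List.cons_ne_nil q rest) from List.getLast_cons _]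
    rw [ih q (acc ++ List.replicate (q - p).toNat (occ.getD p 0))]
    simp [pvSegFrom, List.append_assoc]

-- the segments from the first occupied point are its value followed by the carried fill
theorem pvSegFrom_eq (occ : PySem.Dict Int Int) (duration : Int) :
    ∀ (qs : List Int) (p : Int), p < duration → qs.Pairwise (· < ·) →
    (∀ q ∈ qs, p < q ∧ q < duration) →
    pvSegFrom occ duration p qs = occ.getD p 0 :: pvRemFill occ duration p (occ.getD p 0) qs := by
  intro qs
  induction qs with
  | nil =>
    intro p hp _ _
    simp only [pvSegFrom, pvRemFill]
    rw [show (duration - p).toNat = (duration - (p+1)).toNat + 1 from by omega]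
    rw [List.replicate_succ]
  | cons q rest ih =>
    intro p hp hpw hmem
    have hq := hmem q (by simp)
    simp only [pvSegFrom, pvRemFill]
    rw [ih q hq.2 (List.pairwise_cons.mp hpw).2
      (fun r hr => ⟨(List.pairwise_cons.mp hpw).1 r hr, (hmem r (by simp [hr])).2⟩)]
    rw [show (q - p).toNat = (q - (p+1)).toNat + 1 from by omega]
    rw [List.replicate_succ]
    simp

-- ===== VERDICT (by name: the statement is the Claim_ definition above) =====
theorem closing_holes_spec : Claim_equal_closing_holes := by
  intro array numeration duration _ hpre
  unfold Spec_closing_holes closing_holes closing_holes_alt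
  dsimp only
  set occ := pvOcc array numeration duration with hocc
  have hagree : ∀ i, 0 ≤ i → i < duration →
      occ.get? i = (PySem.List.index? numeration i).map (fun idx => array.getD idx 0) := by
    intro i h1 h2
    exact pvOccGet array numeration duration i h1 h2 (pvPreIdx array numeration duration hpre i h1 h2)
  have hkr := pvOccKeysRange array numeration duration
  have hknd := pvOccKeysNodup array numeration duration
  cases hs : PySem.List.sorted occ.keys (fun x => x) false with
  | nil =>
    have hkeys : occ.keys = [] := (PySem.List.sorted_eq_nil_iff _ _ _).mp hs
    have hidxnone : ∀ i ∈ PySem.List.pyRange 0 duration 1, PySem.List.index? numeration i = none := by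
      intro i hi
      obtain ⟨h1, h2⟩ := PySem.List.mem_pyRange_one.mp hi
      have hget : occ.get? i = none := by
        rw [PySem.Dict.get?_eq_none_iff_not_mem_keys]
        simp [hkeys]
      have h3 := hagree i h1 h2
      rw [hget] at h3
      exact (Option.map_eq_none_iff).mp h3.symm
    rw [pvAfoldNone array numeration _ [] hidxnone]
    simp only [List.nil_append]
    rw [PySem.List.length_pyRange_one]
    refine Prod.ext ?_ rfl
    by_cases hd : 0 ≤ duration
    · rw [PySem.List.slice_zero_start, PySem.List.slice_to (hb := hd)]
      rw [show duration - 0 = duration from by ring, List.take_replicate, min_self]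
    · rw [show (duration - 0).toNat = 0 from by omega, show duration.toNat = 0 from by omega]
      simp [PySem.List.slice]
  | cons p0 rest =>
    -- facts about the sorted occupied points
    have hperm : (p0 :: rest).Perm occ.keys := by
      rw [← hs]; exact PySem.List.sorted_perm _ _ _
    have hmemk : ∀ q, q ∈ (p0 :: rest) ↔ q ∈ occ.keys := fun q => hperm.mem_iff
    have hptsnd : (p0 :: rest).Nodup := hperm.nodup_iff.mpr hknd
    have hple : (p0 :: rest).Pairwise (fun a b => (fun x => x) a ≤ (fun x => x) b) :=
      hs ▸ PySem.List.sorted_pairwise occ.keys (fun x => x)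
    have hplt : (p0 :: rest).Pairwise (· < ·) := by
      have hne' : (p0 :: rest).Pairwise (· ≠ ·) := hptsnd
      exact (hple.and hne').imp (fun h => lt_of_le_of_ne h.1 h.2)
    have hmin : ∀ y ∈ occ.keys, p0 ≤ y := by
      have := PySem.List.key_head_sorted_le (h := hs)
      simpa using this
    have hp0r : 0 ≤ p0 ∧ p0 < duration := hkr p0 ((hmemk p0).mp (by simp))
    -- get? at each occupied point
    have hgetpt : ∀ q ∈ (p0 :: rest), occ.get? q = some (occ.getD q 0) := by
      intro q hq
      have : (occ.get? q).isSome := by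
        rw [← PySem.Dict.contains_eq_isSome_get?, PySem.Dict.contains_iff_mem_keys]
        exact (hmemk q).mp hq
      obtain ⟨w, hw⟩ := Option.isSome_iff_exists.mp this
      rw [PySem.Dict.getD_eq_get?_getD, hw]
      rfl
    have hidxpt : ∀ q ∈ (p0 :: rest),
        (PySem.List.index? numeration q).map (fun idx => array.getD idx 0) = some (occ.getD q 0) := by
      intro q hq
      have hqr := hkr q ((hmemk q).mp hq)
      rw [← hagree q hqr.1 hqr.2]
      exact hgetpt q hq
    have hidxnone : ∀ i, 0 ≤ i → i < duration → i ∉ (p0 :: rest) →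
        PySem.List.index? numeration i = none := by
      intro i h1 h2 hni
      have hget : occ.get? i = none := by
        rw [PySem.Dict.get?_eq_none_iff_not_mem_keys]
        intro hmm; exact hni ((hmemk i).mpr hmm)
      have h3 := hagree i h1 h2
      rw [hget] at h3
      exact (Option.map_eq_none_iff).mp h3.symm
    -- A: split the range at p0
    have hsplit : PySem.List.pyRange 0 duration 1
        = PySem.List.pyRange 0 p0 1 ++ PySem.List.pyRange p0 duration 1 :=
      PySem.List.pyRange_one_append _ _ _ (by omega) (by omega)
    have hlead : ∀ i ∈ PySem.List.pyRange 0 p0 1, PySem.List.index? numeration i = none := by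
      intro i hi
      obtain ⟨h1, h2⟩ := PySem.List.mem_pyRange_one.mp hi
      refine hidxnone i h1 (by omega) ?_
      intro hmm
      have := hmin i ((hmemk i).mp hmm)
      omega
    have hcons : PySem.List.pyRange p0 duration 1 = p0 :: PySem.List.pyRange (p0+1) duration 1 :=
      PySem.List.pyRange_one_cons (by omega)
    rw [hsplit, List.foldl_append, pvAfoldNone array numeration _ [] hlead, hcons]
    simp only [List.nil_append, List.foldl_cons, PySem.List.length_pyRange_one]
    -- the first valid element: A backfills
    have hvp0 := hidxpt p0 (by simp)
    obtain ⟨idx, hidx, hvv⟩ : ∃ idx, PySem.List.index? numeration p0 = some idx ∧ array.getD idx 0 = occ.getD p0 0 := by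
      cases hx : PySem.List.index? numeration p0 with
      | none => rw [hx] at hvp0; simp at hvp0
      | some idx => rw [hx] at hvp0; exact ⟨idx, rfl, by simpa using hvp0⟩
    have hidx' : List.idxOf? p0 numeration = some idx := by simpa using hidx
    have harr : (PySem.List.pyGet? array (idx : Int)).getD 0 = occ.getD p0 0 := by
      rw [PySem.List.pyGet?_natCast, ← hvv]
      simp [List.getD_eq_getElem?_getD]
    have hstepA : pvStepA array numeration (List.replicate (p0 - 0).toNat 0, false) p0
        = (List.replicate (p0 - 0).toNat (occ.getD p0 0) ++ [occ.getD p0 0], true) := by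
      have hb := pvBackfill (p0 - 0).toNat (occ.getD p0 0) (p0 - 0).toNat (le_refl _)
      rw [show (((p0 - 0).toNat : Nat) : Int) = p0 from by omega] at hb
      simp only [pvStepA, PySem.List.index?_eq_idxOf?, hidx']
      simp only [harr]
      rw [if_pos trivial, hb]
      simp
    rw [hstepA]
    -- the rest of A's loop
    have hrestmem : ∀ q ∈ rest, p0 < q ∧ q < duration := by
      intro q hq
      exact ⟨(List.pairwise_cons.mp hplt).1 q hq, (hkr q ((hmemk q).mp (by simp [hq]))).2⟩
    rw [pvArest array numeration duration occ rest p0 (occ.getD p0 0)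
      _ (by simp) (by simp) (by simp; omega) (by omega)
      (List.pairwise_cons.mp hplt).2 hrestmem
      (fun q hq => hidxpt q (by simp [hq]))
      (by
        intro i h1 h2 hni
        refine hidxnone i (by omega) h2 ?_
        intro hmm
        rcases List.mem_cons.mp hmm with h' | h'
        · omega
        · exact hni h')]
    -- B's side
    unfold pvSegBuild
    dsimp only
    rw [pvSegFold occ duration rest p0 _]
    rw [pvSegFrom_eq occ duration rest p0 (by omega) (List.pairwise_cons.mp hplt).2 hrestmem]
    -- the final slice is the identity
    refine Prod.ext ?_ rfl
    have hlen := pvRemFillLen occ duration rest p0 (occ.getD p0 0)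
      (by omega) hrestmem (List.pairwise_cons.mp hplt).2
    rw [PySem.List.slice_zero_start, PySem.List.slice_to (hb := by omega)]
    rw [List.take_of_length_le (by simp; omega)]
    simp
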